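-- pv_equiv track=rewrite | github.com/swbarkerjr/everybodycodes2025 | Quest6/p1-3.py | find_mentor_app_count
-- ===== SOURCE A (Python) =====
-- def find_mentor_app_count(people, mentor, apprentice):
--     count = 0
--     for index, knight in enumerate(people):
--         if knight == mentor:
--             for x in range(index+1, len(people)):
--                 if people[x] == apprentice:
--                     count += 1
--     return count
-- ===== SOURCE B (Python) =====
-- def find_mentor_app_count(people, mentor, apprentice):
--     mentors = 0
--     count = 0
--     for knight in people:
--         if knight == apprentice:
--             count += mentors
--         if knight == mentor:
--             mentors += 1
--     return count
-- ===== Notes on version B (the rewrite author's own statement) =====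
-- stated objective: alternative
-- what changed: Replaced the nested scan (for each mentor occurrence, rescan the suffix for apprentices) with a single left-to-right pass that adds the running mentor count at each apprentice occurrence; on random inputs with few mentor hits the measured times are similar.
import Mathlib
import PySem

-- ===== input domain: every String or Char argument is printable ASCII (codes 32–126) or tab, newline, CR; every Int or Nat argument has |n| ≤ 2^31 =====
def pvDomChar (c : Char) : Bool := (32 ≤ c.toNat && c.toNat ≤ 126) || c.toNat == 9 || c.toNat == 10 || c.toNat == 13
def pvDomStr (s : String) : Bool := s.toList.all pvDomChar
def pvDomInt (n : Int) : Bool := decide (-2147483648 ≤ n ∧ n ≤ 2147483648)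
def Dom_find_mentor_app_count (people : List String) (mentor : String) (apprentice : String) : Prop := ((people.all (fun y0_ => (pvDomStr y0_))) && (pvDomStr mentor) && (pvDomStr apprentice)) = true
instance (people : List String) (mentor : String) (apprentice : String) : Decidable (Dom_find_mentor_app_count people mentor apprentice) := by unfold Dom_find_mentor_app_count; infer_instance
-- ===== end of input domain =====

-- B replaces A's nested suffix scan with one left-to-right pass keeping a running mentor count (objective: alternative single-pass algorithm).

-- ===== PORT A =====
def find_mentor_app_count (people : List String) (mentor : String) (apprentice : String) : Int :=
  (PySem.List.enumerate people 0).foldl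
    (fun count p =>
      if p.2 == mentor then
        (PySem.List.pyRange (p.1 + 1) (PySem.List.len people) 1).foldl
          (fun c x => if PySem.List.pyGetD people x "" == apprentice then c + 1 else c) count
      else count) 0

-- ===== PORT B =====
def find_mentor_app_count_alt (people : List String) (mentor : String) (apprentice : String) : Int :=
  (people.foldl
    (fun (st : Int × Int) knight =>
      let st1 := if knight == apprentice then (st.1, st.2 + st.1) else st
      if knight == mentor then (st1.1 + 1, st1.2) else st1)
    (0, 0)).2

-- ===== PRECONDITION & SPEC =====
def Spec_find_mentor_app_count (people : List String) (mentor : String) (apprentice : String) (out : Int) : Prop := out = find_mentor_app_count_alt people mentor apprentice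
instance (people : List String) (mentor : String) (apprentice : String) (out : Int) : Decidable (Spec_find_mentor_app_count people mentor apprentice out) := by unfold Spec_find_mentor_app_count; infer_instance

-- ===== CLAIM (what is proved, stated in full; the proofs are below) =====
def Claim_equal_find_mentor_app_count : Prop := ∀ (people : List String) (mentor : String) (apprentice : String), Dom_find_mentor_app_count people mentor apprentice → Spec_find_mentor_app_count people mentor apprentice (find_mentor_app_count people mentor apprentice)

-- ===== LEMMAS AND PROOFS =====

-- number of occurrences of a in l, as an Int
def pvCnt (a : String) (l : List String) : Int := (l.countP (fun s => s == a) : Int)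

-- the mathematical value both programs compute: ordered (mentor, later apprentice) pairs
def pvPairs (m a : String) : List String → Int
  | [] => 0
  | k :: t => (if k == m then pvCnt a t else 0) + pvPairs m a t

theorem pvCnt_cons (a k : String) (t : List String) :
    pvCnt a (k :: t) = (if k == a then 1 else 0) + pvCnt a t := by
  unfold pvCnt
  rw [List.countP_cons]
  by_cases h : (k == a) <;> simp [h]
  omega

theorem pvAlt_fold (m a : String) : ∀ (l : List String) (ms c : Int),
    (l.foldl
      (fun (st : Int × Int) knight =>
        let st1 := if knight == a then (st.1, st.2 + st.1) else st
        if knight == m then (st1.1 + 1, st1.2) else st1)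
      (ms, c)).2
    = c + ms * pvCnt a l + pvPairs m a l := by
  intro l
  induction l with
  | nil => intro ms c; simp [pvCnt, pvPairs]
  | cons k t ih =>
    intro ms c
    rw [List.foldl_cons]
    by_cases h1 : (k == a) <;> by_cases h2 : (k == m)
    · have hstep : (let st1 := if k == a then ((ms, c).1, (ms, c).2 + (ms, c).1) else (ms, c)
          if k == m then (st1.1 + 1, st1.2) else st1) = (ms + 1, c + ms) := by
        simp [h1, h2]
      rw [hstep, ih, pvPairs, pvCnt_cons, h1, h2]
      simp only [if_true]
      ring
    · have hstep : (let st1 := if k == a then ((ms, c).1, (ms, c).2 + (ms, c).1) else (ms, c)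
          if k == m then (st1.1 + 1, st1.2) else st1) = (ms, c + ms) := by
        simp [h1, h2]
      rw [hstep, ih, pvPairs, pvCnt_cons, h1]
      simp only [if_true, h2, Bool.false_eq_true, if_false]
      ring
    · have hstep : (let st1 := if k == a then ((ms, c).1, (ms, c).2 + (ms, c).1) else (ms, c)
          if k == m then (st1.1 + 1, st1.2) else st1) = (ms + 1, c) := by
        simp [h1, h2]
      rw [hstep, ih, pvPairs, pvCnt_cons, h2]
      simp only [if_true, h1, Bool.false_eq_true, if_false]
      ring
    · have hstep : (let st1 := if k == a then ((ms, c).1, (ms, c).2 + (ms, c).1) else (ms, c)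
          if k == m then (st1.1 + 1, st1.2) else st1) = (ms, c) := by
        simp [h1, h2]
      rw [hstep, ih, pvPairs, pvCnt_cons]
      simp only [h1, h2, Bool.false_eq_true, if_false]
      ring

theorem pvA_fold (m a : String) (P : List String) :
    ∀ (l : List String) (n : Nat) (acc : Int), P.drop n = l →
    (PySem.List.enumerate l (n : Int)).foldl
      (fun count p =>
        if p.2 == m then
          (PySem.List.pyRange (p.1 + 1) (PySem.List.len P) 1).foldl
            (fun c x => if PySem.List.pyGetD P x "" == a then c + 1 else c) count
        else count) acc
    = acc + pvPairs m a l := by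
  intro l
  induction l with
  | nil => intro n acc _; simp [PySem.List.enumerate_nil, pvPairs]
  | cons k t ih =>
    intro n acc hdrop
    have hdrop' : P.drop (n + 1) = t := by
      have : P.drop (n + 1) = (P.drop n).drop 1 := by
        rw [List.drop_drop]
      rw [this, hdrop]
      rfl
    rw [PySem.List.enumerate_cons]
    simp only [List.foldl_cons]
    have hcast : (n : Int) + 1 = ((n + 1 : Nat) : Int) := by push_cast; ring
    by_cases h2 : (k == m)
    · simp only [h2, if_true]
      have hinner :
          (PySem.List.pyRange ((n : Int) + 1) (PySem.List.len P) 1).foldl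
            (fun c x => if PySem.List.pyGetD P x "" == a then c + 1 else c) acc
          = acc + pvCnt a t := by
        rw [PySem.List.foldl_pyRange_pyGetD P "" (fun c s => if s == a then c + 1 else c) acc
          (by omega : (0:Int) ≤ (n : Int) + 1)]
        have : ((n : Int) + 1).toNat = n + 1 := by omega
        rw [this, hdrop']
        exact PySem.List.foldl_count_if _ _ _
      rw [hinner, hcast, ih (n + 1) (acc + pvCnt a t) hdrop']
      simp only [pvPairs, h2, if_true]
      ring
    · simp only [h2, Bool.false_eq_true, if_false]
      rw [hcast, ih (n + 1) acc hdrop']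
      simp only [pvPairs, h2, Bool.false_eq_true, if_false]
      ring

-- ===== VERDICT (by name: the statement is the Claim_ definition above) =====
theorem find_mentor_app_count_spec : Claim_equal_find_mentor_app_count := by
  intro people mentor apprentice _
  unfold Spec_find_mentor_app_count find_mentor_app_count find_mentor_app_count_alt
  rw [pvAlt_fold mentor apprentice people 0 0]
  have hA := pvA_fold mentor apprentice people people 0 0 rfl
  simp only [Nat.cast_zero] at hA
  rw [hA]
  ring
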